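-- pv_equiv track=rewrite | github.com/asmithasathya/clarify | src/verify/claim_extraction.py | _guess_claim_type
-- ===== SOURCE A (Python) =====
-- def _guess_claim_type(sentence: str) -> str:
--     lowered = sentence.lower()
--     if "except" in lowered or "unless" in lowered:
--         return "exception"
--     if any(keyword in lowered for keyword in ["notice", "file", "serve", "written", "days"]):
--         return "procedural"
--     if any(keyword in lowered for keyword in ["because", "facts", "based on", "if the tenant"]):
--         return "factual"
--     return "rule"
-- ===== SOURCE B (Python) =====
-- def _guess_claim_type(sentence: str) -> str:
--     # Single left-to-right scan of the lowered sentence (a naive multi-pattern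
--     # matcher): at each position test which keyword groups start there,
--     # accumulating one flag per label; then pick the highest-priority flag.
--     lowered = sentence.lower()
--     exc = proc = fact = False
--     for i in range(len(lowered)):
--         exc = exc or lowered.startswith(("except", "unless"), i)
--         proc = proc or lowered.startswith(("notice", "file", "serve", "written", "days"), i)
--         fact = fact or lowered.startswith(("because", "facts", "based on", "if the tenant"), i)
--     if exc:
--         return "exception"
--     if proc:
--         return "procedural"
--     if fact:
--         return "factual"
--     return "rule"
-- ===== Notes on version B (the rewrite author's own statement) =====
-- stated objective: alternative
-- what changed: Instead of running a separate substring search per keyword in an if-cascade with early returns, B makes one left-to-right scan over the positions of the lowered sentence, testing at each position which keyword groups start there and accumulating a match flag per label, then selects the highest-priority matched label.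
import Mathlib
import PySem

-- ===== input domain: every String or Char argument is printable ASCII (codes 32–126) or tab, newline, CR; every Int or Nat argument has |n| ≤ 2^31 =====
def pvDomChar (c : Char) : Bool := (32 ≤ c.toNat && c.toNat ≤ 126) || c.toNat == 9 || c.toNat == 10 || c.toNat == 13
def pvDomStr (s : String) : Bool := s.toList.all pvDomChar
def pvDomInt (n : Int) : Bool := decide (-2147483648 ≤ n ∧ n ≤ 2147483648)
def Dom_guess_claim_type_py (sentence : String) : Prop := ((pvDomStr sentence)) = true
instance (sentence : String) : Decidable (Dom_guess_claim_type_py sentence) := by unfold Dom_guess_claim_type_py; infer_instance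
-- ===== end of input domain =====

-- B replaces per-keyword substring searches in an if-cascade by one positional scan of the
-- lowered sentence collecting a match flag per label, then a priority selection (alternative, same cost).
-- ===== PORT A =====
def guess_claim_type_py (sentence : String) : String :=
  let lowered := PySem.Str.lower sentence
  if PySem.Str.isIn "except" lowered || PySem.Str.isIn "unless" lowered then "exception"
  else if ["notice", "file", "serve", "written", "days"].any (fun keyword => PySem.Str.isIn keyword lowered) then "procedural"
  else if ["because", "facts", "based on", "if the tenant"].any (fun keyword => PySem.Str.isIn keyword lowered) then "factual"
  else "rule"

-- ===== PORT B =====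
-- Python's lowered.startswith(kw, i) for 0 ≤ i: kw is a prefix of the suffix starting at i (exact).
def pvStartsAt (chars : List Char) (kw : String) (i : Nat) : Bool :=
  kw.toList.isPrefixOf (chars.drop i)

def guess_claim_type_py_alt (sentence : String) : String :=
  let chars := (PySem.Str.lower sentence).toList
  let st := (List.range chars.length).foldl
    (fun (st : Bool × Bool × Bool) i =>
      (st.1 || (pvStartsAt chars "except" i || pvStartsAt chars "unless" i),
       st.2.1 || (pvStartsAt chars "notice" i || pvStartsAt chars "file" i || pvStartsAt chars "serve" i || pvStartsAt chars "written" i || pvStartsAt chars "days" i),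
       st.2.2 || (pvStartsAt chars "because" i || pvStartsAt chars "facts" i || pvStartsAt chars "based on" i || pvStartsAt chars "if the tenant" i)))
    (false, false, false)
  if st.1 then "exception"
  else if st.2.1 then "procedural"
  else if st.2.2 then "factual"
  else "rule"

-- ===== PRECONDITION & SPEC =====
def Spec_guess_claim_type_py (sentence : String) (out : String) : Prop := out = guess_claim_type_py_alt sentence
instance (sentence : String) (out : String) : Decidable (Spec_guess_claim_type_py sentence out) := by unfold Spec_guess_claim_type_py; infer_instance

-- ===== CLAIM =====
def Claim_equal_guess_claim_type_py : Prop := ∀ (sentence : String), Dom_guess_claim_type_py sentence → Spec_guess_claim_type_py sentence (guess_claim_type_py sentence)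

-- ===== LEMMAS AND PROOFS =====
lemma pvFold_eq (gE gP gF : Nat → Bool) (l : List Nat) (e p f : Bool) :
    l.foldl (fun (st : Bool × Bool × Bool) i => (st.1 || gE i, st.2.1 || gP i, st.2.2 || gF i)) (e, p, f)
      = (e || l.any gE, p || l.any gP, f || l.any gF) := by
  induction l generalizing e p f with
  | nil => simp
  | cons x xs ih => simp [List.foldl, ih, Bool.or_assoc]

lemma pvAny_split {α : Type} (l : List α) (p q : α → Bool) :
    (l.any fun x => p x || q x) = (l.any p || l.any q) := by
  induction l with
  | nil => simp
  | cons x xs ih =>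
      cases hp : p x <;> cases hq : q x <;> simp [List.any_cons, ih, hp, hq]

lemma pvAny_eq (kw : String) (h : kw.toList ≠ []) (s : List Char) :
    (List.range s.length).any (fun i => pvStartsAt s kw i) = PySem.Chars.isIn kw.toList s := by
  rw [Bool.eq_iff_iff]
  constructor
  · intro hany
    rcases List.any_eq_true.mp hany with ⟨i, _, hpre⟩
    exact (PySem.Chars.exists_prefix_drop_iff_isIn kw.toList s).mp
      ⟨i, List.isPrefixOf_iff_prefix.mp hpre⟩
  · intro hin
    rcases (PySem.Chars.exists_prefix_drop_iff_isIn kw.toList s).mpr hin with ⟨j, hj⟩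
    refine List.any_eq_true.mpr ⟨j, List.mem_range.mpr ?_, List.isPrefixOf_iff_prefix.mpr hj⟩
    by_contra hlt
    rw [List.drop_eq_nil_of_le (Nat.le_of_not_lt hlt)] at hj
    exact h (List.prefix_nil.mp hj)

-- ===== VERDICT =====
theorem guess_claim_type_py_spec : Claim_equal_guess_claim_type_py := by
  intro sentence _
  unfold Spec_guess_claim_type_py guess_claim_type_py guess_claim_type_py_alt
  simp only [pvFold_eq, Bool.false_or, pvAny_split,
    pvAny_eq "except" (by decide), pvAny_eq "unless" (by decide),
    pvAny_eq "notice" (by decide), pvAny_eq "file" (by decide),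
    pvAny_eq "serve" (by decide), pvAny_eq "written" (by decide),
    pvAny_eq "days" (by decide), pvAny_eq "because" (by decide),
    pvAny_eq "facts" (by decide), pvAny_eq "based on" (by decide),
    pvAny_eq "if the tenant" (by decide),
    PySem.Str.isIn_eq, List.any_cons, List.any_nil, Bool.or_false, Bool.or_assoc]
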